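-- pv_equiv track=rewrite | github.com/PolyArch/loom | tests/scripts/check_bridge_tags.py | decode_memory_config
-- ===== SOURCE A (Python) =====
-- ADDR_BIT_WIDTH = 57
--
-- def decode_memory_config(
--         words: list[int], ld_count: int, st_count: int,
--         num_region: int | None = None
-- ) -> list[tuple[int, int, int, int]]:
--     """Decode config words into (valid, start_tag, end_tag, addr_offset).
--
--     Field layout per region (low-to-high):
--       addr_offset(ADDR_BIT_WIDTH), end_tag(tw+1), start_tag(tw), valid(1)
--     where tw = clog2(max(ldCount, stCount)).
--
--     If num_region is given, decode exactly that many regions (hardware sizes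
--     config by numRegion). Otherwise infer from total bit count.
--     """
--     is_bridge = (ld_count > 1 or st_count > 1)
--     tw = 0
--     if is_bridge:
--         tw = 1
--         while (1 << tw) < max(ld_count, st_count):
--             tw += 1
--     bits_per_region = ADDR_BIT_WIDTH + 1
--     if tw > 0:
--         bits_per_region += tw + (tw + 1)
--
--     combined = 0
--     for idx, w in enumerate(words):
--         combined |= (w << (32 * idx))
--
--     if num_region is not None:
--         n_regions = num_region
--     else:
--         total_bits = len(words) * 32
--         n_regions = total_bits // bits_per_region if bits_per_region > 0 else 0
--
--     regions = []
--     bit_pos = 0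
--     for _ in range(n_regions):
--         addr_off = (combined >> bit_pos) & ((1 << ADDR_BIT_WIDTH) - 1)
--         bit_pos += ADDR_BIT_WIDTH
--         end_tag, start_tag = 0, 0
--         if tw > 0:
--             end_tag = (combined >> bit_pos) & ((1 << (tw + 1)) - 1)
--             bit_pos += tw + 1
--             start_tag = (combined >> bit_pos) & ((1 << tw) - 1)
--             bit_pos += tw
--         valid = (combined >> bit_pos) & 1
--         bit_pos += 1
--         regions.append((valid, start_tag, end_tag, addr_off))
--     return regions
-- ===== SOURCE B (Python) =====
-- ADDR_BIT_WIDTH = 57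
--
--
-- def decode_memory_config(words, ld_count, st_count, num_region=None):
--     """Decode config words into (valid, start_tag, end_tag, addr_offset).
--
--     Reads the words once as a little-endian bit stream: an accumulator is
--     refilled 32 bits at a time (missing words read as 0) and each region's
--     fields are pulled off its low end in layout order
--     addr_offset(57), end_tag(tw+1), start_tag(tw), valid(1).
--     """
--     hi = max(ld_count, st_count)
--     tw = (hi - 1).bit_length() if hi > 1 else 0
--     widths = (ADDR_BIT_WIDTH, tw + 1, tw, 1) if tw else (ADDR_BIT_WIDTH, 1)
--     if num_region is None:
--         num_region = len(words) * 32 // sum(widths)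
--
--     it = iter(words)
--     acc, nbits = 0, 0
--     out = []
--     for _ in range(num_region):
--         fields = []
--         for width in widths:
--             while nbits < width:
--                 acc |= next(it, 0) << nbits
--                 nbits += 32
--             fields.append(acc & ((1 << width) - 1))
--             acc >>= width
--             nbits -= width
--         if tw:
--             addr_off, end_tag, start_tag, valid = fields
--         else:
--             end_tag, start_tag = 0, 0
--             addr_off, valid = fields
--         out.append((valid, start_tag, end_tag, addr_off))
--     return out
-- ===== Notes on version B (the rewrite author's own statement) =====
-- stated objective: faster
-- what changed: B replaces A's packing of all words into one huge integer (repeated big-int OR of each word shifted by 32*idx, then per-region shifts of that huge value) by a single streaming pass: a small accumulator is refilled 32 bits at a time from the word list (exhausted reads give 0) and each field is masked off its low end in layout order, so no large integer is ever built.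
import Mathlib
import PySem

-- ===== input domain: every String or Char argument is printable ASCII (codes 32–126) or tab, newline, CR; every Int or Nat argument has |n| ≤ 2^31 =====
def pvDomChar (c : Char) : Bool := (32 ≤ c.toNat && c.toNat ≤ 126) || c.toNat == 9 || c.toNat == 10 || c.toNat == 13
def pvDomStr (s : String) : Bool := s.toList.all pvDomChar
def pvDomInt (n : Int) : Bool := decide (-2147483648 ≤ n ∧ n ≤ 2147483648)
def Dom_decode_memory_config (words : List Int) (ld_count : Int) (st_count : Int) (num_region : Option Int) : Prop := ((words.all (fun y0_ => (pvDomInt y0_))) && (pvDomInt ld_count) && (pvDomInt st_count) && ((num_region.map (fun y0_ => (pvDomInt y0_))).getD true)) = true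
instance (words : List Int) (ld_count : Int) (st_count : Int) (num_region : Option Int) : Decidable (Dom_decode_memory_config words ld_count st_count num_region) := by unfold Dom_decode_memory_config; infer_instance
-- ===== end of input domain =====

-- B replaces A's quadratic packing of all words into one huge integer (and the
-- per-region shifts of that integer) by a single streaming pass: a small
-- accumulator is refilled 32 bits at a time and each field is masked off its
-- low end; return values are proved identical on Dom.

-- ===== PORT A =====
-- ADDR_BIT_WIDTH = 57 (module constant, shared by both sources)

-- A's `while (1 << tw) < max(ld_count, st_count): tw += 1`; fuel 64 covers every
-- |ld_count|,|st_count| <= 2^31 input of Dom (the loop then stops by tw = 32).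
def pvTwLoop (mx : Int) (tw : Nat) (fuel : Nat) : Nat :=
  match fuel with
  | 0 => tw
  | fuel + 1 => if ((1 : Int) <<< tw) < mx then pvTwLoop mx (tw + 1) fuel else tw

-- A's `for _ in range(n_regions)` body: fields via shift-and-mask, running bit_pos.
def pvGoA (combined : Int) (tw : Nat) (fuel : Nat) (bit_pos : Nat)
    (acc : List (Int × Int × Int × Int)) : List (Int × Int × Int × Int) :=
  match fuel with
  | 0 => acc
  | fuel + 1 =>
    let addr_off := PySem.Int.band (combined >>> bit_pos) (((1 : Int) <<< (57 : Nat)) - 1)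
    let p1 := bit_pos + 57
    if tw > 0 then
      let end_tag := PySem.Int.band (combined >>> p1) (((1 : Int) <<< (tw + 1)) - 1)
      let p2 := p1 + (tw + 1)
      let start_tag := PySem.Int.band (combined >>> p2) (((1 : Int) <<< tw) - 1)
      let p3 := p2 + tw
      let valid := PySem.Int.band (combined >>> p3) 1
      pvGoA combined tw fuel (p3 + 1) (acc ++ [(valid, start_tag, end_tag, addr_off)])
    else
      let valid := PySem.Int.band (combined >>> p1) 1
      pvGoA combined tw fuel (p1 + 1) (acc ++ [(valid, 0, 0, addr_off)])

def decode_memory_config (words : List Int) (ld_count : Int) (st_count : Int) (num_region : Option Int) : List (Int × Int × Int × Int) :=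
  let is_bridge : Bool := decide (ld_count > 1) || decide (st_count > 1)
  let tw : Nat := if is_bridge then pvTwLoop (max ld_count st_count) 1 64 else 0
  let bits_per_region : Int := 57 + 1 + (if tw > 0 then ((tw : Int) + ((tw : Int) + 1)) else 0)
  -- `combined |= w << (32*idx)` over enumerate(words): fold carrying (combined, idx)
  let combined : Int :=
    (words.foldl (fun (s : Int × Nat) (w : Int) => (PySem.Int.bor s.1 ((w <<< (32 * s.2) : Int)), s.2 + 1)) (0, 0)).1
  let n_regions : Int :=
    match num_region with
    | some n => n
    | none => if bits_per_region > 0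
              then PySem.Int.floordiv ((words.length : Int) * 32) bits_per_region
              else 0
  pvGoA combined tw n_regions.toNat 0 []

-- ===== PORT B =====
-- `while nbits < width: acc |= next(it, 0) << nbits; nbits += 32`
-- (the iterator state is the list of not-yet-read words; exhausted reads give 0)
def pvRefill (width : Nat) (ws : List Int) (acc : Int) (nbits : Nat) : List Int × Int × Nat :=
  if nbits < width then
    match ws with
    | [] => pvRefill width [] (PySem.Int.bor acc ((0 : Int) <<< nbits)) (nbits + 32)
    | w :: t => pvRefill width t (PySem.Int.bor acc (w <<< nbits)) (nbits + 32)
  else (ws, acc, nbits)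
termination_by width - nbits
decreasing_by all_goals omega

-- one `for width in widths` iteration: refill, mask the field off, shift it out
def pvTakeField (width : Nat) (st : List Int × Int × Nat) : Int × (List Int × Int × Nat) :=
  let st' := pvRefill width st.1 st.2.1 st.2.2
  (PySem.Int.band st'.2.1 (((1 : Int) <<< width) - 1), (st'.1, st'.2.1 >>> width, st'.2.2 - width))

-- `for _ in range(num_region)` with the `for width in widths` field loop inside
def pvRegions (widths : List Nat) (tw : Nat) (fuel : Nat) (st : List Int × Int × Nat) :
    List (Int × Int × Int × Int) :=
  match fuel with
  | 0 => []
  | fuel + 1 =>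
    let p := widths.foldl (fun (p : List Int × (List Int × Int × Nat)) width =>
        let r := pvTakeField width p.2
        (p.1 ++ [r.1], r.2)) ([], st)
    let tup : Int × Int × Int × Int :=
      if tw > 0 then
        match p.1 with
        | [a, e, s, v] => (v, s, e, a)
        | _ => (0, 0, 0, 0)   -- unreachable: widths has four entries when tw > 0
      else
        match p.1 with
        | [a, v] => (v, 0, 0, a)
        | _ => (0, 0, 0, 0)   -- unreachable: widths has two entries when tw = 0
    tup :: pvRegions widths tw fuel p.2

def decode_memory_config_alt (words : List Int) (ld_count : Int) (st_count : Int) (num_region : Option Int) : List (Int × Int × Int × Int) :=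
  let hi : Int := max ld_count st_count
  let tw : Nat := if 1 < hi then PySem.Int.bitLength (hi - 1) else 0
  let widths : List Nat := if tw > 0 then [57, tw + 1, tw, 1] else [57, 1]
  let n : Int :=
    match num_region with
    | some n => n
    | none => PySem.Int.floordiv ((words.length : Int) * 32) ((widths.sum : Nat) : Int)
  pvRegions widths tw n.toNat (words, 0, 0)

-- ===== PRECONDITION & SPEC =====
def Spec_decode_memory_config (words : List Int) (ld_count : Int) (st_count : Int) (num_region : Option Int) (out : List (Int × Int × Int × Int)) : Prop := out = decode_memory_config_alt words ld_count st_count num_region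
instance (words : List Int) (ld_count : Int) (st_count : Int) (num_region : Option Int) (out : List (Int × Int × Int × Int)) : Decidable (Spec_decode_memory_config words ld_count st_count num_region out) := by unfold Spec_decode_memory_config; infer_instance

-- ===== CLAIM (what is proved, stated in full; the proofs are below) =====
def Claim_equal_decode_memory_config : Prop := ∀ (words : List Int) (ld_count : Int) (st_count : Int) (num_region : Option Int), Dom_decode_memory_config words ld_count st_count num_region → Spec_decode_memory_config words ld_count st_count num_region (decode_memory_config words ld_count st_count num_region)

-- ===== LEMMAS AND PROOFS =====

theorem pvPowPos (k : Nat) : (0:Int) < 2 ^ k := by positivity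
theorem pvPowCast (k : Nat) : ((2:Int))^k = ((2^k : Nat) : Int) := by push_cast; ring

theorem pvBandMaskNeg (x : Int) (hx : x < 0) (k : Nat) : PySem.Int.band x (2 ^ k - 1) = x % 2 ^ k := by
  have hK := pvPowPos k
  have hm : (0:Int) ≤ 2 ^ k - 1 := by omega
  rw [PySem.Int.band, if_neg (by omega), if_pos hm]
  have h1 : (1:Nat) ≤ 2^k := Nat.one_le_two_pow
  have h : ((2:Int))^k - 1 = ((2^k - 1 : Nat) : Int) := by push_cast [h1]; ring
  rw [h, Int.toNat_natCast]
  set y : Nat := (-x - 1).toNat with hy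
  have hxy : x = -((y:Int) + 1) := by simp [hy]; omega
  rw [Nat.land_comm, Nat.and_two_pow_sub_one_eq_mod]
  have hn : y % 2^k < 2^k := Nat.mod_lt _ (by positivity)
  have hyd : (y:Int) = 2^k * (y / 2^k : Nat) + (y % 2^k : Nat) := by
    conv_lhs => rw [← Nat.div_add_mod y (2^k)]
    push_cast; ring
  have key : x = ((2:Int)^k - 1 - (y % 2^k : Nat)) + 2^k * (-((y / 2^k : Nat):Int) - 1) := by
    rw [hxy, hyd]; push_cast; ring
  rw [key, Int.add_mul_emod_self_left, Int.emod_eq_of_lt (by push_cast; omega) (by push_cast; omega)]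
  have h2 : (2^k - 1 - y % 2^k : Nat) = (2^k - (1 + y % 2^k) : Nat) := by omega
  have h3 : 1 + y % 2^k ≤ 2^k := by omega
  rw [h2]
  push_cast [h3]
  ring

theorem pvBandMask (x : Int) (k : Nat) : PySem.Int.band x (2 ^ k - 1) = x % 2 ^ k := by
  by_cases hx : 0 ≤ x
  · have hm : (0:Int) ≤ 2 ^ k - 1 := by have := pvPowPos k; omega
    rw [PySem.Int.band, if_pos hx, if_pos hm]
    have h : ((2:Int))^k - 1 = ((2^k - 1 : Nat) : Int) := by
      have : (1:Nat) ≤ 2^k := Nat.one_le_two_pow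
      push_cast [this]; ring
    rw [h, Int.toNat_natCast, Nat.and_two_pow_sub_one_eq_mod]
    rw [← Int.toNat_of_nonneg hx]; push_cast; rfl
  · exact pvBandMaskNeg x (by omega) k

theorem pvOneShl (k : Nat) : ((1:Int) <<< k) = 2 ^ k := by
  rw [Int.shiftLeft_eq, one_mul]

theorem pvShr (c : Int) (p : Nat) : c >>> p = c / 2 ^ p := by
  simpa using Int.shiftRight_eq_div_pow c p

-- ((x % 2^B) / 2^a) % 2^b = (x / 2^a) % 2^b  when a + b <= B
theorem pvModDivMod (x : Int) (a b B : Nat) (h : a + b ≤ B) :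
    ((x % 2 ^ B) / 2 ^ a) % 2 ^ b = (x / 2 ^ a) % 2 ^ b := by
  have hsplit : x = x % 2 ^ B + (2 ^ (B - a - b) * (x / 2 ^ B) * 2 ^ b) * 2 ^ a := by
    have h2 : (2:Int) ^ (B - a - b) * 2 ^ b * 2 ^ a = 2 ^ B := by
      rw [← pow_add, ← pow_add]
      congr 1
      omega
    rw [show (2:Int) ^ (B - a - b) * (x / 2 ^ B) * 2 ^ b * 2 ^ a
          = (2 ^ (B - a - b) * 2 ^ b * 2 ^ a) * (x / 2 ^ B) by ring, h2]
    rw [Int.add_comm]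
    exact (Int.ediv_add_emod x (2 ^ B)).symm
  conv_rhs => rw [hsplit]
  rw [Int.add_mul_ediv_right _ _ (by have := pvPowPos a; omega)]
  rw [show x % 2 ^ B / 2 ^ a + 2 ^ (B - a - b) * (x / 2 ^ B) * 2 ^ b
        = x % 2 ^ B / 2 ^ a + 2 ^ b * (2 ^ (B - a - b) * (x / 2 ^ B)) by ring]
  rw [Int.add_mul_emod_self_left]

theorem pvDivDiv (x : Int) (a b : Nat) : x / 2 ^ a / 2 ^ b = x / 2 ^ (a + b) := by
  rw [Int.ediv_ediv_eq_ediv_mul (le_of_lt (pvPowPos a)), ← pow_add]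

-- tw: A's while loop = (mx-1).bit_length() for 2 ≤ mx ≤ 2^31
theorem pvTwLoopGo (mx : Int) (L : Nat) (hlow : (2:Int) ^ (L - 1) < mx) (hhigh : mx ≤ 2 ^ L) :
    ∀ fuel tw, 1 ≤ tw → tw ≤ L → L - tw ≤ fuel → pvTwLoop mx tw fuel = L := by
  intro fuel
  induction fuel with
  | zero =>
    intro tw _ h2 h3
    have : tw = L := by omega
    simp [pvTwLoop, this]
  | succ fuel ih =>
    intro tw h1 h2 h3
    rw [pvTwLoop]
    by_cases hc : ((1:Int) <<< tw) < mx
    · have htwL : tw < L := by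
        by_contra hcon
        have : tw = L := by omega
        rw [pvOneShl, this] at hc
        omega
      rw [if_pos hc]
      exact ih (tw + 1) (by omega) (by omega) (by omega)
    · rw [if_neg hc]
      rw [pvOneShl] at hc
      by_contra hcon
      have htwL : tw ≤ L - 1 := by omega
      have : (2:Int) ^ tw ≤ 2 ^ (L - 1) :=
        pow_le_pow_right₀ (by omega) htwL
      omega

theorem pvTwEq (mx : Int) (h2 : 2 ≤ mx) (h31 : mx ≤ (2:Int) ^ 31) :
    pvTwLoop mx 1 64 = PySem.Int.bitLength (mx - 1) := by
  set L := PySem.Int.bitLength (mx - 1) with hL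
  have hna : ((mx - 1).natAbs : Int) = mx - 1 := Int.natAbs_of_nonneg (by omega)
  have f1 : (mx - 1).natAbs < 2 ^ L := PySem.Int.lt_two_pow_bitLength (mx - 1)
  have f2 : 2 ^ (L - 1) ≤ (mx - 1).natAbs := PySem.Int.two_pow_bitLength_le (mx - 1) (by omega)
  have hhigh : mx ≤ 2 ^ L := by
    have : ((mx - 1).natAbs : Int) < ((2 ^ L : Nat) : Int) := by exact_mod_cast f1
    rw [hna, ← pvPowCast] at this
    omega
  have hL1 : 1 ≤ L := by
    by_contra hcon
    have hz : L = 0 := by omega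
    rw [hz] at f1
    omega
  have hlow : (2:Int) ^ (L - 1) < mx := by
    have : ((2 ^ (L - 1) : Nat) : Int) ≤ ((mx - 1).natAbs : Int) := by exact_mod_cast f2
    rw [hna, ← pvPowCast] at this
    omega
  have hL32 : L ≤ 32 := by
    by_contra hcon
    have h32 : 32 ≤ L - 1 := by omega
    have : (2:Int) ^ 32 ≤ 2 ^ (L - 1) := pow_le_pow_right₀ (by omega) h32
    have h31' : (2:Int) ^ 31 * 2 = 2 ^ 32 := by norm_num
    omega
  exact pvTwLoopGo mx L hlow hhigh 64 1 (by omega) hL1 (by omega)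

-- ---- PySem.Int.bor on the Int constructors ----
theorem pvBorCN (A n : Nat) : PySem.Int.bor (A : Int) (Int.negSucc n) = Int.negSucc (n - (n &&& A)) := by
  have h2 : ¬ (0:Int) ≤ Int.negSucc n := by rw [Int.negSucc_eq]; omega
  rw [PySem.Int.bor, if_pos (Int.natCast_nonneg A), if_neg h2]
  have h3 : (-(Int.negSucc n) - 1).toNat = n := by rw [Int.negSucc_eq]; omega
  rw [h3, Int.toNat_natCast, Int.negSucc_eq]
  push_cast
  ring

theorem pvBorNC (n B : Nat) : PySem.Int.bor (Int.negSucc n) (B : Int) = Int.negSucc (n - (n &&& B)) := by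
  have h2 : ¬ (0:Int) ≤ Int.negSucc n := by rw [Int.negSucc_eq]; omega
  rw [PySem.Int.bor, if_neg h2, if_pos (Int.natCast_nonneg B)]
  have h3 : (-(Int.negSucc n) - 1).toNat = n := by rw [Int.negSucc_eq]; omega
  rw [h3, Int.toNat_natCast, Int.negSucc_eq]
  push_cast
  ring

theorem pvBorNN (m n : Nat) : PySem.Int.bor (Int.negSucc m) (Int.negSucc n) = Int.negSucc (m &&& n) := by
  have hm : ¬ (0:Int) ≤ Int.negSucc m := by rw [Int.negSucc_eq]; omega
  have hn : ¬ (0:Int) ≤ Int.negSucc n := by rw [Int.negSucc_eq]; omega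
  rw [PySem.Int.bor, if_neg hm, if_neg hn]
  have h3 : (-(Int.negSucc m) - 1).toNat = m := by rw [Int.negSucc_eq]; omega
  have h4 : (-(Int.negSucc n) - 1).toNat = n := by rw [Int.negSucc_eq]; omega
  rw [h3, h4, Int.negSucc_eq]
  push_cast
  ring

-- ---- Nat divisions/mods distribute over the bit operations ----
theorem pvNAndDiv (x y s : Nat) : (x &&& y) / 2 ^ s = (x / 2 ^ s) &&& (y / 2 ^ s) := by
  induction s generalizing x y with
  | zero => simp
  | succ s ih =>
    rw [pow_succ, ← Nat.div_div_eq_div_mul, ih, Nat.and_div_two,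
        Nat.div_div_eq_div_mul, Nat.div_div_eq_div_mul, ← pow_succ]

theorem pvNOrDiv (x y s : Nat) : (x ||| y) / 2 ^ s = (x / 2 ^ s) ||| (y / 2 ^ s) := by
  induction s generalizing x y with
  | zero => simp
  | succ s ih =>
    rw [pow_succ, ← Nat.div_div_eq_div_mul, ih, Nat.or_div_two,
        Nat.div_div_eq_div_mul, Nat.div_div_eq_div_mul, ← pow_succ]

theorem pvNAndMod (x y m : Nat) : (x &&& y) % 2 ^ m = (x % 2 ^ m) &&& (y % 2 ^ m) := by
  apply Nat.eq_of_testBit_eq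
  intro i
  simp only [Nat.testBit_mod_two_pow, Nat.testBit_and]
  by_cases h : i < m <;> simp [h]

theorem pvNOrMod (x y m : Nat) : (x ||| y) % 2 ^ m = (x % 2 ^ m) ||| (y % 2 ^ m) := by
  apply Nat.eq_of_testBit_eq
  intro i
  simp only [Nat.testBit_mod_two_pow, Nat.testBit_or]
  by_cases h : i < m <;> simp [h]

-- subtracting a bitwise subset commutes with / and % by a power of two
theorem pvNSubDiv (x y s : Nat) (hy : y ≤ x) (hmod : y % 2 ^ s ≤ x % 2 ^ s) :
    (x - y) / 2 ^ s = x / 2 ^ s - y / 2 ^ s := by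
  have hk : 0 < 2 ^ s := Nat.two_pow_pos s
  have hx := Nat.div_add_mod x (2 ^ s)
  have hyd := Nat.div_add_mod y (2 ^ s)
  have hq : y / 2 ^ s ≤ x / 2 ^ s := Nat.div_le_div_right hy
  have hql : 2 ^ s * (y / 2 ^ s) ≤ 2 ^ s * (x / 2 ^ s) := Nat.mul_le_mul_left _ hq
  have hrx : x % 2 ^ s < 2 ^ s := Nat.mod_lt _ hk
  have hsub : x - y = 2 ^ s * (x / 2 ^ s - y / 2 ^ s) + (x % 2 ^ s - y % 2 ^ s) := by
    rw [Nat.mul_sub]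
    omega
  have hz : (x % 2 ^ s - y % 2 ^ s) / 2 ^ s = 0 := Nat.div_eq_of_lt (by omega)
  rw [hsub, Nat.mul_add_div hk, hz]
  omega

theorem pvNSubMod (x y s : Nat) (hy : y ≤ x) (hmod : y % 2 ^ s ≤ x % 2 ^ s) :
    (x - y) % 2 ^ s = x % 2 ^ s - y % 2 ^ s := by
  have hk : 0 < 2 ^ s := Nat.two_pow_pos s
  have hx := Nat.div_add_mod x (2 ^ s)
  have hyd := Nat.div_add_mod y (2 ^ s)
  have hq : y / 2 ^ s ≤ x / 2 ^ s := Nat.div_le_div_right hy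
  have hql : 2 ^ s * (y / 2 ^ s) ≤ 2 ^ s * (x / 2 ^ s) := Nat.mul_le_mul_left _ hq
  have hrx : x % 2 ^ s < 2 ^ s := Nat.mod_lt _ hk
  have hsub : x - y = 2 ^ s * (x / 2 ^ s - y / 2 ^ s) + (x % 2 ^ s - y % 2 ^ s) := by
    rw [Nat.mul_sub]
    omega
  have hz : (x % 2 ^ s - y % 2 ^ s) % 2 ^ s = x % 2 ^ s - y % 2 ^ s := Nat.mod_eq_of_lt (by omega)
  rw [hsub, Nat.mul_add_mod, hz]

-- ---- Int constructor arithmetic ----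
theorem pvCastDiv (A s : Nat) : ((A : Int)) / 2 ^ s = ((A / 2 ^ s : Nat) : Int) := by
  rw [pvPowCast, ← Int.natCast_ediv]

theorem pvCastMod (A m : Nat) : ((A : Int)) % 2 ^ m = ((A % 2 ^ m : Nat) : Int) := by
  rw [pvPowCast, ← Int.natCast_emod]

theorem pvNegSuccSplit (n s : Nat) :
    Int.negSucc n = ((2:Int) ^ s - 1 - ((n % 2 ^ s : Nat) : Int)) + (-((n / 2 ^ s : Nat) : Int) - 1) * 2 ^ s := by
  have hd := Nat.div_add_mod n (2 ^ s)
  have hcast : ((2 ^ s * (n / 2 ^ s) + n % 2 ^ s : Nat) : Int) = (n : Int) := by rw [hd]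
  push_cast at hcast
  rw [Int.negSucc_eq]
  push_cast
  linarith

theorem pvNegSuccDiv (n s : Nat) : (Int.negSucc n) / 2 ^ s = Int.negSucc (n / 2 ^ s) := by
  have hk := pvPowPos s
  have hr : n % 2 ^ s < 2 ^ s := Nat.mod_lt _ (Nat.two_pow_pos s)
  have hrI : ((n % 2 ^ s : Nat) : Int) < 2 ^ s := by rw [pvPowCast]; exact_mod_cast hr
  rw [pvNegSuccSplit n s, Int.add_mul_ediv_right _ _ (by omega),
      Int.ediv_eq_zero_of_lt (by omega) (by omega), Int.negSucc_eq]
  push_cast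
  ring

theorem pvNegSuccMod (n m : Nat) : (Int.negSucc n) % 2 ^ m = (2:Int) ^ m - 1 - ((n % 2 ^ m : Nat) : Int) := by
  have hk := pvPowPos m
  have hr : n % 2 ^ m < 2 ^ m := Nat.mod_lt _ (Nat.two_pow_pos m)
  have hrI : ((n % 2 ^ m : Nat) : Int) < 2 ^ m := by rw [pvPowCast]; exact_mod_cast hr
  have h0 : (0:Int) ≤ ((n % 2 ^ m : Nat) : Int) := Int.natCast_nonneg _
  rw [pvNegSuccSplit n m, Int.add_mul_emod_self_right,
      Int.emod_eq_of_lt (by omega) (by omega)]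

theorem pvNegSuccMulPow (k m : Nat) : (Int.negSucc k) * 2 ^ m = Int.negSucc ((k + 1) * 2 ^ m - 1) := by
  have h1 : (1:Nat) ≤ (k + 1) * 2 ^ m := by
    have := Nat.two_pow_pos m
    exact Nat.one_le_iff_ne_zero.mpr (by positivity)
  rw [Int.negSucc_eq, Int.negSucc_eq]
  push_cast [h1]
  ring

-- dividing by 2^s distributes over Python's `|`
theorem pvBorDiv (a b : Int) (s : Nat) :
    PySem.Int.bor a b / 2 ^ s = PySem.Int.bor (a / 2 ^ s) (b / 2 ^ s) := by
  rcases a with A | m <;> rcases b with B | n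
  · rw [Int.ofNat_eq_natCast, Int.ofNat_eq_natCast, PySem.Int.bor_natCast,
        pvCastDiv, pvCastDiv, pvCastDiv, PySem.Int.bor_natCast, pvNOrDiv]
  · rw [Int.ofNat_eq_natCast, pvBorCN, pvNegSuccDiv, pvCastDiv, pvNegSuccDiv, pvBorCN]
    congr 1
    rw [pvNSubDiv _ _ _ Nat.and_le_left (by rw [pvNAndMod]; exact Nat.and_le_left), pvNAndDiv]
  · rw [Int.ofNat_eq_natCast, pvBorNC, pvNegSuccDiv, pvCastDiv, pvNegSuccDiv, pvBorNC]
    congr 1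
    rw [pvNSubDiv _ _ _ Nat.and_le_left (by rw [pvNAndMod]; exact Nat.and_le_left), pvNAndDiv]
  · rw [pvBorNN, pvNegSuccDiv, pvNegSuccDiv, pvNegSuccDiv, pvBorNN]
    congr 1
    exact pvNAndDiv m n s

-- `a | (b * 2^m)` does not change the low m bits
-- the low m bits of (k+1)*2^m - 1 are all ones
theorem pvTOnes (k m : Nat) : ((k + 1) * 2 ^ m - 1) % 2 ^ m = 2 ^ m - 1 := by
  have hp := Nat.two_pow_pos m
  have hmul : (k + 1) * 2 ^ m = k * 2 ^ m + 2 ^ m := by ring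
  have hval : (k + 1) * 2 ^ m - 1 = (2 ^ m - 1) + k * 2 ^ m := by omega
  rw [hval, Nat.add_mul_mod_self_right, Nat.mod_eq_of_lt (by omega)]

theorem pvBorModHigh (a b : Int) (m : Nat) :
    PySem.Int.bor a (b * 2 ^ m) % 2 ^ m = a % 2 ^ m := by
  have hp := Nat.two_pow_pos m
  rcases a with A | x <;> rcases b with B | k
  · rw [Int.ofNat_eq_natCast, Int.ofNat_eq_natCast]
    have hBc : (B : Int) * 2 ^ m = ((B * 2 ^ m : Nat) : Int) := by push_cast; ring
    rw [hBc, PySem.Int.bor_natCast, pvCastMod, pvCastMod, pvNOrMod, Nat.mul_mod_left, Nat.or_zero]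
  · rw [Int.ofNat_eq_natCast, pvNegSuccMulPow, pvBorCN, pvNegSuccMod, pvCastMod]
    have hAlt : A % 2 ^ m < 2 ^ m := Nat.mod_lt _ hp
    have hAnd : (((k + 1) * 2 ^ m - 1) &&& A) % 2 ^ m = A % 2 ^ m := by
      rw [pvNAndMod, pvTOnes, Nat.and_comm, Nat.and_two_pow_sub_one_eq_mod,
          Nat.mod_eq_of_lt hAlt]
    have hN : (((k + 1) * 2 ^ m - 1) - (((k + 1) * 2 ^ m - 1) &&& A)) % 2 ^ m
        = 2 ^ m - 1 - A % 2 ^ m := by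
      rw [pvNSubMod _ _ _ Nat.and_le_left (by rw [hAnd, pvTOnes]; omega), hAnd, pvTOnes]
    rw [hN, pvPowCast]
    omega
  · rw [Int.ofNat_eq_natCast]
    have hBc : (B : Int) * 2 ^ m = ((B * 2 ^ m : Nat) : Int) := by push_cast; ring
    rw [hBc, pvBorNC, pvNegSuccMod, pvNegSuccMod]
    have hu : (x &&& B * 2 ^ m) % 2 ^ m = 0 := by
      rw [pvNAndMod, Nat.mul_mod_left, Nat.and_zero]
    have hN : (x - (x &&& B * 2 ^ m)) % 2 ^ m = x % 2 ^ m := by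
      rw [pvNSubMod _ _ _ Nat.and_le_left (by rw [hu]; omega), hu]
      omega
    rw [hN]
  · rw [pvNegSuccMulPow, pvBorNN, pvNegSuccMod, pvNegSuccMod]
    have hxlt : x % 2 ^ m < 2 ^ m := Nat.mod_lt _ hp
    have hN : (x &&& ((k + 1) * 2 ^ m - 1)) % 2 ^ m = x % 2 ^ m := by
      rw [pvNAndMod, pvTOnes, Nat.and_two_pow_sub_one_eq_mod, Nat.mod_eq_of_lt hxlt]
    rw [hN]

-- ===== A's packing fold, recursively =====
def pvAC (c : Int) (i : Nat) : List Int → Int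
  | [] => c
  | w :: t => pvAC (PySem.Int.bor c ((w <<< (32 * i) : Int))) (i + 1) t

theorem pvFoldAC (ws : List Int) : ∀ (c : Int) (i : Nat),
    (ws.foldl (fun (s : Int × Nat) (w : Int) => (PySem.Int.bor s.1 ((w <<< (32 * s.2) : Int)), s.2 + 1)) (c, i)).1
      = pvAC c i ws := by
  induction ws with
  | nil => intro c i; rfl
  | cons w t ih => intro c i; simpa [pvAC] using ih _ _

theorem pvACHigh (ws : List Int) : ∀ (c : Int) (i m : Nat), m ≤ 32 * i →
    pvAC c i ws % 2 ^ m = c % 2 ^ m := by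
  induction ws with
  | nil => intro c i m _; rfl
  | cons w t ih =>
    intro c i m hm
    simp only [pvAC]
    rw [ih _ _ _ (by omega)]
    have hsh : (w <<< (32 * i) : Int) = (w * 2 ^ (32 * i - m)) * 2 ^ m := by
      rw [Int.shiftLeft_eq, mul_assoc, ← pow_add]
      congr 2
      omega
    rw [hsh, pvBorModHigh]

theorem pvACPrefix (ws : List Int) : ∀ (c : Int) (i r m : Nat), m ≤ 32 * (i + r) →
    pvAC c i ws % 2 ^ m = pvAC c i (ws.take r) % 2 ^ m := by
  induction ws with
  | nil => intro c i r m _; simp [pvAC]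
  | cons w t ih =>
    intro c i r m hm
    cases r with
    | zero =>
      simp only [List.take_zero, pvAC]
      rw [pvACHigh t _ _ _ (by omega)]
      have hsh : (w <<< (32 * i) : Int) = (w * 2 ^ (32 * i - m)) * 2 ^ m := by
        rw [Int.shiftLeft_eq, mul_assoc, ← pow_add]
        congr 2
        omega
      rw [hsh, pvBorModHigh]
    | succ r =>
      simp only [List.take_succ_cons, pvAC]
      exact ih _ _ _ _ (by omega)

theorem pvACAppend (xs : List Int) : ∀ (c : Int) (i : Nat) (w : Int),
    pvAC c i (xs ++ [w]) = PySem.Int.bor (pvAC c i xs) (w <<< (32 * (i + xs.length))) := by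
  induction xs with
  | nil => intro c i w; simp [pvAC]
  | cons x t ih =>
    intro c i w
    simp only [List.cons_append, pvAC, List.length_cons]
    rw [ih]
    congr 2
    omega

-- ===== the streaming state invariant =====
theorem pvShlDiv (w : Int) (a pos nbits : Nat) (h : a = pos + nbits) :
    (w <<< a : Int) / 2 ^ pos = w <<< nbits := by
  rw [Int.shiftLeft_eq, Int.shiftLeft_eq, h, pow_add,
      show w * (2 ^ pos * 2 ^ nbits) = w * 2 ^ nbits * 2 ^ pos by ring,
      Int.mul_ediv_cancel _ (by have := pvPowPos pos; omega)]

theorem pvRefillSpec (words : List Int) (width : Nat) :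
    ∀ (gas : Nat) (ws : List Int) (acc : Int) (nbits pos r : Nat),
    width - nbits ≤ gas →
    32 * r = pos + nbits → ws = words.drop r → acc = pvAC 0 0 (words.take r) / 2 ^ pos →
    ∃ r', 32 * r' = pos + (pvRefill width ws acc nbits).2.2 ∧
      (pvRefill width ws acc nbits).1 = words.drop r' ∧
      (pvRefill width ws acc nbits).2.1 = pvAC 0 0 (words.take r') / 2 ^ pos ∧
      width ≤ (pvRefill width ws acc nbits).2.2 := by
  intro gas
  induction gas with
  | zero =>
    intro ws acc nbits pos r hgas h1 h2 h3
    have hnl : ¬ nbits < width := by omega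
    rw [pvRefill.eq_def, if_neg hnl]
    exact ⟨r, by simpa using h1, by simpa using h2, by simpa using h3,
      by simpa using (show width ≤ nbits by omega)⟩
  | succ gas ih =>
    intro ws acc nbits pos r hgas h1 h2 h3
    by_cases hlt : nbits < width
    · cases ws with
      | nil =>
        rw [pvRefill.eq_def, if_pos hlt]
        have hlen : words.length ≤ r := List.drop_eq_nil_iff.mp h2.symm
        have hacc' : PySem.Int.bor acc ((0 : Int) <<< nbits)
            = pvAC 0 0 (words.take (r + 1)) / 2 ^ pos := by
          rw [Int.shiftLeft_eq, zero_mul, PySem.Int.bor_zero, h3,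
              List.take_of_length_le hlen, List.take_of_length_le (by omega)]
        exact ih [] _ (nbits + 32) pos (r + 1) (by omega) (by omega)
          (by rw [List.drop_eq_nil_of_le (by omega)]) hacc'
      | cons w t =>
        rw [pvRefill.eq_def, if_pos hlt]
        have hrlt : r < words.length := by
          by_contra hcon
          rw [List.drop_eq_nil_of_le (by omega)] at h2
          exact List.cons_ne_nil _ _ h2
        have hget : words[r]? = some w := by
          have := List.getElem?_drop (xs := words) (i := r) (j := 0)
          rw [← h2] at this
          simpa using this.symm
        have htake : words.take (r + 1) = words.take r ++ [w] := by
          rw [List.take_succ, hget]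
          rfl
        have hdrop : words.drop (r + 1) = t := by
          have := congrArg (List.drop 1) h2
          rw [List.drop_drop] at this
          simpa using this.symm
        have hacc' : PySem.Int.bor acc (w <<< nbits)
            = pvAC 0 0 (words.take (r + 1)) / 2 ^ pos := by
          rw [htake, pvACAppend, pvBorDiv, ← h3]
          congr 1
          rw [pvShlDiv w _ pos nbits (by rw [List.length_take]; omega)]
        exact ih t _ (nbits + 32) pos (r + 1) (by omega) (by omega) hdrop.symm hacc'
    · rw [pvRefill.eq_def, if_neg hlt]
      exact ⟨r, by simpa using h1, by simpa using h2, by simpa using h3,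
        by simpa using (show width ≤ nbits by omega)⟩

theorem pvTakeFieldSpec (words : List Int) (width : Nat) (ws : List Int) (acc : Int)
    (nbits pos r : Nat)
    (h1 : 32 * r = pos + nbits) (h2 : ws = words.drop r)
    (h3 : acc = pvAC 0 0 (words.take r) / 2 ^ pos) :
    ∃ r', pos + width ≤ 32 * r' ∧
      pvTakeField width (ws, acc, nbits) =
        (PySem.Int.band ((pvAC 0 0 words) >>> pos) (((1 : Int) <<< width) - 1),
         (words.drop r', pvAC 0 0 (words.take r') / 2 ^ (pos + width), 32 * r' - (pos + width))) := by
  obtain ⟨r', ha, hb, hc, hw⟩ := pvRefillSpec words width width ws acc nbits pos r (by omega) h1 h2 h3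
  refine ⟨r', by omega, ?_⟩
  simp only [pvTakeField]
  have hnb : (pvRefill width ws acc nbits).2.2 - width = 32 * r' - (pos + width) := by omega
  have hsh : (pvAC 0 0 (words.take r') / 2 ^ pos) >>> width
      = pvAC 0 0 (words.take r') / 2 ^ (pos + width) := by
    rw [pvShr, pvDivDiv]
  have hfield : PySem.Int.band (pvAC 0 0 (words.take r') / 2 ^ pos) (((1 : Int) <<< width) - 1)
      = PySem.Int.band ((pvAC 0 0 words) >>> pos) (((1 : Int) <<< width) - 1) := by
    rw [pvOneShl, pvBandMask, pvBandMask, pvShr,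
        ← pvModDivMod (pvAC 0 0 (words.take r')) pos width (pos + width) le_rfl,
        ← pvModDivMod (pvAC 0 0 words) pos width (pos + width) le_rfl,
        pvACPrefix words 0 0 r' (pos + width) (by omega)]
  rw [hb, hc, hnb, hsh, hfield]

-- region extraction, proof-side description of A's loop body
def pvBprN (tw : Nat) : Nat := 57 + 1 + (if tw > 0 then 2 * tw + 1 else 0)

def pvRegA (c : Int) (tw p : Nat) : Int × Int × Int × Int :=
  if tw > 0 then
    (PySem.Int.band (c >>> (p + 57 + (tw + 1) + tw)) 1,
     PySem.Int.band (c >>> (p + 57 + (tw + 1))) (((1 : Int) <<< tw) - 1),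
     PySem.Int.band (c >>> (p + 57)) (((1 : Int) <<< (tw + 1)) - 1),
     PySem.Int.band (c >>> p) (((1 : Int) <<< (57 : Nat)) - 1))
  else
    (PySem.Int.band (c >>> (p + 57)) 1, 0, 0,
     PySem.Int.band (c >>> p) (((1 : Int) <<< (57 : Nat)) - 1))

theorem pvGoAEq (c : Int) (tw : Nat) :
    ∀ (fuel p : Nat) (acc : List (Int × Int × Int × Int)),
    pvGoA c tw fuel p acc = acc ++ (List.range fuel).map (fun k => pvRegA c tw (p + k * pvBprN tw)) := by
  intro fuel
  induction fuel with
  | zero => intro p acc; simp [pvGoA]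
  | succ fuel ih =>
    intro p acc
    have hB : ∀ k : Nat, p + (k + 1) * pvBprN tw = p + pvBprN tw + k * pvBprN tw := by
      intro k; ring
    by_cases htw : tw > 0
    · simp only [pvGoA, if_pos htw]
      rw [ih, List.range_succ_eq_map, List.map_cons, List.map_map, List.append_assoc, List.singleton_append]
      refine congrArg (fun l => acc ++ l) (List.cons_eq_cons.mpr ⟨?_, ?_⟩)
      · simp [pvRegA, htw]
      · apply List.map_congr_left
        intro k _
        have hidx : p + 57 + (tw + 1) + tw + 1 + k * pvBprN tw = p + (k + 1) * pvBprN tw := by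
          rw [hB k]; simp only [pvBprN, if_pos htw]; omega
        simp only [Function.comp]
        rw [hidx]
    · simp only [pvGoA, if_neg htw]
      rw [ih, List.range_succ_eq_map, List.map_cons, List.map_map, List.append_assoc, List.singleton_append]
      refine congrArg (fun l => acc ++ l) (List.cons_eq_cons.mpr ⟨?_, ?_⟩)
      · simp [pvRegA, htw]
      · apply List.map_congr_left
        intro k _
        have hidx : p + 57 + 1 + k * pvBprN tw = p + (k + 1) * pvBprN tw := by
          simp only [pvBprN, if_neg htw]; omega
        simp only [Function.comp]
        rw [hidx]

-- B's outer loop produces exactly A's per-region tuples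
theorem pvRegionsEq (words : List Int) (tw : Nat) :
    ∀ (n r pos nbits : Nat) (ws : List Int) (acc : Int),
    32 * r = pos + nbits → ws = words.drop r → acc = pvAC 0 0 (words.take r) / 2 ^ pos →
    pvRegions (if tw > 0 then [57, tw + 1, tw, 1] else [57, 1]) tw n (ws, acc, nbits)
      = (List.range n).map (fun k => pvRegA (pvAC 0 0 words) tw (pos + k * pvBprN tw)) := by
  intro n
  induction n with
  | zero => intro r pos nbits ws acc _ _ _; simp [pvRegions]
  | succ n ih =>
    intro r pos nbits ws acc h1 h2 h3
    obtain ⟨r1, hr1, he1⟩ := pvTakeFieldSpec words 57 ws acc nbits pos r h1 h2 h3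
    have hone : (((1 : Int) <<< (1 : Nat)) - 1) = 1 := by decide
    by_cases htw : tw > 0
    · simp only [if_pos htw, pvRegions, List.foldl_cons, List.foldl_nil]
      obtain ⟨r2, hr2, he2⟩ := pvTakeFieldSpec words (tw + 1) (words.drop r1)
        (pvAC 0 0 (words.take r1) / 2 ^ (pos + 57)) (32 * r1 - (pos + 57)) (pos + 57) r1
        (by omega) rfl rfl
      obtain ⟨r3, hr3, he3⟩ := pvTakeFieldSpec words tw (words.drop r2)
        (pvAC 0 0 (words.take r2) / 2 ^ (pos + 57 + (tw + 1))) (32 * r2 - (pos + 57 + (tw + 1)))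
        (pos + 57 + (tw + 1)) r2 (by omega) rfl rfl
      obtain ⟨r4, hr4, he4⟩ := pvTakeFieldSpec words 1 (words.drop r3)
        (pvAC 0 0 (words.take r3) / 2 ^ (pos + 57 + (tw + 1) + tw)) (32 * r3 - (pos + 57 + (tw + 1) + tw))
        (pos + 57 + (tw + 1) + tw) r3 (by omega) rfl rfl
      rw [show pos + 57 + (tw + 1) = (pos + 57) + (tw + 1) from rfl] at he2
      rw [show pos + 57 + (tw + 1) + tw = (pos + 57 + (tw + 1)) + tw from rfl] at he3
      rw [show pos + 57 + (tw + 1) + tw + 1 = (pos + 57 + (tw + 1) + tw) + 1 from rfl] at he4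
      simp only [he1, he2, he3, he4]
      have ihr := ih r4 (pos + 57 + (tw + 1) + tw + 1) (32 * r4 - (pos + 57 + (tw + 1) + tw + 1))
        (words.drop r4) _ (by omega) rfl rfl
      rw [if_pos htw] at ihr
      rw [ihr]
      rw [List.range_succ_eq_map, List.map_cons, List.map_map]
      refine List.cons_eq_cons.mpr ⟨?_, ?_⟩
      · simp [pvRegA, htw, hone]
      · apply List.map_congr_left
        intro k _
        have hidx : pos + 57 + (tw + 1) + tw + 1 + k * pvBprN tw = pos + (k + 1) * pvBprN tw := by
          simp only [pvBprN, if_pos htw]; ring_nf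
        simp only [Function.comp]
        rw [hidx]
    · simp only [if_neg htw, pvRegions, List.foldl_cons, List.foldl_nil]
      obtain ⟨r2, hr2, he2⟩ := pvTakeFieldSpec words 1 (words.drop r1)
        (pvAC 0 0 (words.take r1) / 2 ^ (pos + 57)) (32 * r1 - (pos + 57)) (pos + 57) r1
        (by omega) rfl rfl
      simp only [he1, he2]
      have ihr := ih r2 (pos + 57 + 1) (32 * r2 - (pos + 57 + 1)) (words.drop r2) _ (by omega) rfl rfl
      rw [if_neg htw] at ihr
      rw [ihr]
      rw [List.range_succ_eq_map, List.map_cons, List.map_map]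
      refine List.cons_eq_cons.mpr ⟨?_, ?_⟩
      · simp [pvRegA, htw, hone]
      · apply List.map_congr_left
        intro k _
        have hidx : pos + 57 + 1 + k * pvBprN tw = pos + (k + 1) * pvBprN tw := by
          simp only [pvBprN, if_neg htw]; ring_nf
        simp only [Function.comp]
        rw [hidx]

-- ===== VERDICT (by name: the statement is the Claim_ definition above) =====
theorem decode_memory_config_spec : Claim_equal_decode_memory_config := by
  intro words ld_count st_count num_region hdom
  unfold Dom_decode_memory_config at hdom
  simp only [Bool.and_eq_true, List.all_eq_true, pvDomInt, decide_eq_true_eq] at hdom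
  obtain ⟨⟨⟨hws, hld⟩, hst⟩, -⟩ := hdom
  unfold Spec_decode_memory_config decode_memory_config decode_memory_config_alt
  simp only []
  -- the two tw computations agree
  have hbb : (decide (ld_count > 1) || decide (st_count > 1)) = decide (1 < max ld_count st_count) := by
    rw [decide_eq_decide.mpr lt_max_iff]
    rw [show ∀ p q : Prop, ∀ [Decidable p] [Decidable q], decide (p ∨ q) = (decide p || decide q) from fun p q _ _ => by
      by_cases hp : p <;> by_cases hq : q <;> simp [hp, hq]]
  have htw : (if (decide (ld_count > 1) || decide (st_count > 1)) = true then pvTwLoop (max ld_count st_count) 1 64 else 0)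
      = (if 1 < max ld_count st_count then PySem.Int.bitLength (max ld_count st_count - 1) else 0) := by
    rw [hbb]
    by_cases hbr : 1 < max ld_count st_count
    · rw [if_pos (by simpa using hbr), if_pos hbr]
      have h31 : max ld_count st_count ≤ (2:Int) ^ 31 := by
        apply max_le <;> norm_num <;> omega
      exact pvTwEq _ (by omega) h31
    · rw [if_neg (by simpa using hbr), if_neg hbr]
  rw [← htw]
  set tw : Nat := if (decide (ld_count > 1) || decide (st_count > 1)) = true then pvTwLoop (max ld_count st_count) 1 64 else 0 with htwdef
  -- bits per region agree
  have hbpr : (57 + 1 + (if tw > 0 then ((tw : Int) + ((tw : Int) + 1)) else 0) : Int) = ((pvBprN tw : Nat) : Int) := by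
    by_cases h : tw > 0 <;> simp [pvBprN, h] <;> push_cast <;> ring
  have hbprpos : (0:Int) < 57 + 1 + (if tw > 0 then ((tw : Int) + ((tw : Int) + 1)) else 0) := by
    by_cases h : tw > 0 <;> simp [h] <;> positivity
  have hsum : (((if tw > 0 then [57, tw + 1, tw, 1] else [57, 1] : List Nat).sum : Nat) : Int) = ((pvBprN tw : Nat) : Int) := by
    by_cases h : tw > 0 <;> simp [h, pvBprN] <;> push_cast <;> ring
  -- the region counts agree
  have hn : (match num_region with
      | some n => n
      | none => if (57 + 1 + (if tw > 0 then ((tw : Int) + ((tw : Int) + 1)) else 0) : Int) > 0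
                then PySem.Int.floordiv ((words.length : Int) * 32) (57 + 1 + (if tw > 0 then ((tw : Int) + ((tw : Int) + 1)) else 0))
                else 0)
      = (match num_region with
      | some n => n
      | none => PySem.Int.floordiv ((words.length : Int) * 32) (((if tw > 0 then [57, tw + 1, tw, 1] else [57, 1] : List Nat).sum : Nat) : Int)) := by
    cases num_region with
    | some n => rfl
    | none => rw [if_pos hbprpos, hbpr, hsum]
  rw [hn]
  -- combined is the recursive packing fold
  rw [pvFoldAC words 0 0, pvGoAEq, List.nil_append]
  -- B's streaming loop yields the same per-region tuples
  rw [pvRegionsEq words tw _ 0 0 0 words 0 (by omega) List.drop_zero.symm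
      (by simp [pvAC])]
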